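-- pv_equiv track=rewrite | github.com/the-omega-institute/automath | tools/community-outreach/targets/teorth_equational_theories/coefficient_analysis.py | anti_implications_from_patterns
-- ===== SOURCE A (Python) =====
-- from typing import Iterable
--
-- def anti_implications_from_patterns(patterns: Iterable[int], equation_count: int) -> int:
--     all_equations = (1 << equation_count) - 1
--     anti_implications = 0
--     for satisfied in patterns:
--         refuted = all_equations ^ satisfied
--         bits = satisfied
--         while bits:
--             low_bit = bits & -bits
--             index = low_bit.bit_length() - 1
--             bits -= low_bit
--             anti_implications |= refuted << (index * equation_count)
--     return anti_implications
-- ===== SOURCE B (Python) =====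
-- def anti_implications_from_patterns(patterns, equation_count):
--     patterns = list(patterns)
--     all_equations = (1 << equation_count) - 1
--     width = 0
--     for p in patterns:
--         width = max(width, p.bit_length())
--     result = 0
--     for index in range(width):
--         mask = 1 << index
--         block = 0
--         for p in patterns:
--             if p & mask:
--                 block |= all_equations ^ p
--         result |= block << (index * equation_count)
--     return result
-- ===== Notes on version B (the rewrite author's own statement) =====
-- stated objective: alternative
-- what changed: B transposes the loops: instead of extracting the set bits of each pattern and OR-ing a shifted copy of its complement into the big accumulator per bit, B makes one staged pass per bit index (up to the maximal bit length), OR-ing together the complements of all patterns that have that bit, and shifts each combined block into the result exactly once.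
import Mathlib
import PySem

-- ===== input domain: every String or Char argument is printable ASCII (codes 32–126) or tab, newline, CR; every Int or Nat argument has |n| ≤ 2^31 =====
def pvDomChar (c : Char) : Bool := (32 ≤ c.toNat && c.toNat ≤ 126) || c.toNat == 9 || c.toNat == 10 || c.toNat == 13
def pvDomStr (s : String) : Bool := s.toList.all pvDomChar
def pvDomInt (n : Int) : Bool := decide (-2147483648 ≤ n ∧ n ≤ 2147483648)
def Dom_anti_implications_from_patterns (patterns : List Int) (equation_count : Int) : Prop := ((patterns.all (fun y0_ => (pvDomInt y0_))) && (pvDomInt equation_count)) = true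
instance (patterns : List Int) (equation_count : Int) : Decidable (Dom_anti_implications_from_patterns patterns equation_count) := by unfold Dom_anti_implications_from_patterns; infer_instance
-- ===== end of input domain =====

-- B transposes the loops: one staged pass per bit index (up to the maximal pattern
-- bit length), OR-ing the complements of all patterns carrying that bit into one
-- block and shifting each block into the result exactly once (alternative algorithm).

-- ===== PORT A =====
-- inner 'while bits:' loop of A.  Guard is '0 < bits' instead of 'bits ≠ 0': for
-- negative bits Python's loop never terminates (excluded by Pre_), on bits ≥ 0 the
-- two guards agree.  low_bit.bit_length() is PySem.Int.bitLength (Python-exact);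
-- 'refuted << (index * equation_count)' shifts by the Nat (index*E).toNat — exact
-- since index ≥ 0 and Pre_ gives equation_count ≥ 0 (Python raises on a negative shift).
def pvAInner (E r : Int) (bits acc : Int) : Int :=
  if h : 0 < bits then
    pvAInner E r (bits - PySem.Int.band bits (-bits))
      (PySem.Int.bor acc (r <<< (((PySem.Int.bitLength (PySem.Int.band bits (-bits)) : Int) - 1) * E).toNat))
  else acc
termination_by bits.toNat
decreasing_by
  have hneg : ¬ ((0:Int) ≤ -bits) := by omega
  have e : (- -bits - 1).toNat = bits.toNat - 1 := by omega
  have h1 : PySem.Int.band bits (-bits) = ((bits.toNat - (bits.toNat &&& (bits.toNat - 1)) : Nat) : Int) := by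
    unfold PySem.Int.band
    rw [if_pos (le_of_lt h), if_neg hneg, e]
  have hle : bits.toNat &&& (bits.toNat - 1) ≤ bits.toNat - 1 := Nat.and_le_right
  rw [h1]; omega

def anti_implications_from_patterns (patterns : List Int) (equation_count : Int) : Int :=
  -- '1 << equation_count' : Python raises for equation_count < 0 (excluded by Pre_)
  let all_equations : Int := (1 <<< equation_count.toNat) - 1
  patterns.foldl
    (fun anti_implications satisfied =>
      pvAInner equation_count (PySem.Int.bxor all_equations satisfied) satisfied anti_implications)
    0

-- ===== PORT B =====
-- 'width = 0; for p in patterns: width = max(width, p.bit_length())'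
def pvBWidth (ps : List Int) : Int :=
  ps.foldl (fun w p => max w ((PySem.Int.bitLength p : Int))) 0

-- inner 'for p in patterns: if p & mask: block |= all_equations ^ p'
def pvBBlock (allv mask : Int) (ps : List Int) : Int :=
  ps.foldl (fun block p =>
    if PySem.Int.band p mask ≠ 0 then PySem.Int.bor block (PySem.Int.bxor allv p) else block) 0

-- outer 'for index in range(width): result |= block << (index * equation_count)';
-- 'index * equation_count' is a nonnegative shift on Pre_ (index ≥ 0 from range).
def anti_implications_from_patterns_alt (patterns : List Int) (equation_count : Int) : Int :=
  let all_equations : Int := (1 <<< equation_count.toNat) - 1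
  (PySem.List.pyRange 0 (pvBWidth patterns) 1).foldl
    (fun result index =>
      PySem.Int.bor result
        ((pvBBlock all_equations ((1 : Int) <<< index.toNat) patterns) <<< ((index * equation_count).toNat)))
    0

-- ===== PRECONDITION & SPEC =====
-- Pre_ excludes equation_count < 0 (Python: '1 << equation_count' raises ValueError)
-- and negative patterns (Python: 'while bits' with bits < 0 never terminates).
def Pre_anti_implications_from_patterns (patterns : List Int) (equation_count : Int) : Prop :=
  0 ≤ equation_count ∧ ∀ p ∈ patterns, 0 ≤ p
instance (patterns : List Int) (equation_count : Int) : Decidable (Pre_anti_implications_from_patterns patterns equation_count) := by unfold Pre_anti_implications_from_patterns; infer_instance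

def pvWitness_anti_implications_from_patterns : List Int × Int := ([5, 3], 3)

def Spec_anti_implications_from_patterns (patterns : List Int) (equation_count : Int) (out : Int) : Prop := out = anti_implications_from_patterns_alt patterns equation_count
instance (patterns : List Int) (equation_count : Int) (out : Int) : Decidable (Spec_anti_implications_from_patterns patterns equation_count out) := by unfold Spec_anti_implications_from_patterns; infer_instance

-- ===== CLAIM =====
def Claim_equal_anti_implications_from_patterns : Prop := ∀ (patterns : List Int) (equation_count : Int), Dom_anti_implications_from_patterns patterns equation_count → Pre_anti_implications_from_patterns patterns equation_count → Spec_anti_implications_from_patterns patterns equation_count (anti_implications_from_patterns patterns equation_count)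

-- ===== LEMMAS AND PROOFS =====

-- position of the lowest set bit
def pvLowPos (n : Nat) : Nat :=
  if n % 2 = 1 ∨ n = 0 then 0 else pvLowPos (n / 2) + 1
termination_by n
decreasing_by omega

-- contribution of one pattern: OR over set bits k of n of (r <<< ((i+k)*E))
def pvG (r E : Nat) (n i : Nat) : Nat :=
  if n = 0 then 0 else (if n % 2 = 1 then r <<< (i * E) else 0) ||| pvG r E (n / 2) (i + 1)
termination_by n
decreasing_by omega

theorem pvG_zero (r E i : Nat) : pvG r E 0 i = 0 := by rw [pvG]; simp

theorem pvG_two_mul (r E m i : Nat) : pvG r E (2 * m) i = pvG r E m (i + 1) := by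
  rcases Nat.eq_zero_or_pos m with hm | hm
  · subst hm; simp [pvG_zero]
  · rw [pvG]
    have h2 : ¬ (2 * m = 0) := by omega
    have h3 : ¬ (2 * m % 2 = 1) := by omega
    have h4 : 2 * m / 2 = m := by omega
    rw [if_neg h2, if_neg h3, h4]
    simp

theorem pvG_odd (r E n i : Nat) (h : n % 2 = 1) :
    pvG r E n i = r <<< (i * E) ||| pvG r E (n / 2) (i + 1) := by
  rw [pvG]
  have h0 : ¬ n = 0 := by omega
  rw [if_neg h0, if_pos h]

theorem pvLowPos_odd (n : Nat) (h : n % 2 = 1) : pvLowPos n = 0 := by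
  rw [pvLowPos]; simp [h]

theorem pvLowPos_even (m : Nat) (hm : 0 < m) : pvLowPos (2 * m) = pvLowPos m + 1 := by
  rw [pvLowPos]
  have h1 : ¬ (2 * m % 2 = 1 ∨ 2 * m = 0) := by omega
  have h4 : 2 * m / 2 = m := by omega
  rw [if_neg h1, h4]

-- the low-bit identity:  n - (n &&& (n-1)) = 2 ^ pvLowPos n ≤ n
theorem pvAnd_pred_odd (n : Nat) (h : n % 2 = 1) : n &&& (n - 1) = n - 1 := by
  apply Nat.eq_of_testBit_eq
  intro j
  obtain ⟨k, hk⟩ : ∃ k, n = 2 * k + 1 := ⟨n / 2, by omega⟩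
  subst hk
  have e0 : 2 * k + 1 - 1 = 2 * k := by omega
  rw [e0]
  cases j with
  | zero =>
      have a1 : (2 * k + 1) % 2 = 1 := by omega
      have a2 : (2 * k) % 2 = 0 := by omega
      simp [Nat.testBit_zero, a1, a2]
  | succ j =>
      have d1 : (2 * k + 1) / 2 = k := by omega
      have d2 : 2 * k / 2 = k := by omega
      simp only [Nat.testBit_and]
      simp [Nat.testBit_succ, d1, d2]

theorem pvAnd_pred_even (m : Nat) (hm : 0 < m) :
    (2 * m) &&& (2 * m - 1) = 2 * (m &&& (m - 1)) := by
  apply Nat.eq_of_testBit_eq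
  intro j
  cases j with
  | zero =>
      have a1 : (2 * m) % 2 = 0 := by omega
      have a2 : (2 * (m &&& (m - 1))) % 2 = 0 := by omega
      simp [Nat.testBit_zero, a1, a2]
  | succ j =>
      have e1 : 2 * m / 2 = m := by omega
      have e2 : (2 * m - 1) / 2 = m - 1 := by omega
      have e3 : 2 * (m &&& (m - 1)) / 2 = m &&& (m - 1) := by omega
      simp only [Nat.testBit_and]
      simp only [Nat.testBit_succ, e1, e2, e3]
      simp [Nat.testBit_and]

theorem pvLow_eq_pow (n : Nat) (hn : 0 < n) :
    n - (n &&& (n - 1)) = 2 ^ pvLowPos n ∧ 2 ^ pvLowPos n ≤ n := by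
  induction n using Nat.strong_induction_on with
  | _ n ih =>
    rcases Nat.even_or_odd n with he | ho
    · obtain ⟨m, hm⟩ := he
      have hm2 : n = 2 * m := by omega
      subst hm2
      have hmpos : 0 < m := by omega
      obtain ⟨ih1, ih2⟩ := ih m (by omega) hmpos
      rw [pvAnd_pred_even m hmpos, pvLowPos_even m hmpos]
      constructor
      · rw [pow_succ]
        have hle : m &&& (m - 1) ≤ m := Nat.and_le_left
        omega
      · rw [pow_succ]; omega
    · have h1 : n % 2 = 1 := Nat.odd_iff.mp ho
      rw [pvAnd_pred_odd n h1, pvLowPos_odd n h1]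
      constructor <;> simp <;> omega

-- bitLength of a power of two
theorem pvBitLength_pow (i : Nat) : PySem.Int.bitLength ((2 ^ i : Nat) : Int) = i + 1 := by
  induction i with
  | zero => decide
  | succ i ih =>
      rw [PySem.Int.bitLength_natCast (by positivity)]
      have : 2 ^ (i + 1) / 2 = 2 ^ i := by
        rw [pow_succ]; omega
      rw [this, ih]

-- key removal lemma: taking out the lowest set bit removes exactly its term from pvG
theorem pvG_remove_low (r E : Nat) (n : Nat) (hn : 0 < n) (i : Nat) :
    pvG r E n i = r <<< ((i + pvLowPos n) * E) ||| pvG r E (n - 2 ^ pvLowPos n) i := by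
  induction n using Nat.strong_induction_on generalizing i with
  | _ n ih =>
    rcases Nat.even_or_odd n with he | ho
    · obtain ⟨m, hm⟩ := he
      have hm2 : n = 2 * m := by omega
      subst hm2
      have hmpos : 0 < m := by omega
      obtain ⟨_, hle⟩ := pvLow_eq_pow m hmpos
      rw [pvLowPos_even m hmpos, pvG_two_mul, ih m (by omega) hmpos (i + 1)]
      have e1 : 2 * m - 2 ^ (pvLowPos m + 1) = 2 * (m - 2 ^ pvLowPos m) := by
        rw [pow_succ]; omega
      rw [e1, pvG_two_mul]
      have e2 : i + 1 + pvLowPos m = i + (pvLowPos m + 1) := by omega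
      rw [e2]
    · have h1 : n % 2 = 1 := Nat.odd_iff.mp ho
      rw [pvLowPos_odd n h1, pvG_odd r E n i h1]
      have e1 : n - 2 ^ 0 = 2 * (n / 2) := by omega
      rw [e1, pvG_two_mul]
      have e2 : i + 0 = i := by omega
      rw [e2]

-- A's inner loop computes acc ||| pvG
theorem pvAInner_eq (E r : Int) (hE : 0 ≤ E) (hr : 0 ≤ r) (n a : Nat) :
    pvAInner E r (n : Int) (a : Int) = ((a ||| pvG r.toNat E.toNat n 0 : Nat) : Int) := by
  induction n using Nat.strong_induction_on generalizing a with
  | _ n ih =>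
    rcases Nat.eq_zero_or_pos n with h0 | hpos
    · subst h0
      rw [pvAInner]
      simp [pvG_zero]
    · obtain ⟨hlow, hle⟩ := pvLow_eq_pow n hpos
      have hband : PySem.Int.band (n : Int) (-(n : Int)) = ((2 ^ pvLowPos n : Nat) : Int) := by
        unfold PySem.Int.band
        have hnn : (0 : Int) ≤ (n : Int) := by positivity
        have hneg : ¬ (0 ≤ -(n : Int)) := by omega
        simp only [if_pos hnn, if_neg hneg]
        rw [← hlow]
        congr 1
        have : (-(-(n : Int)) - 1).toNat = n - 1 := by omega
        rw [Int.toNat_natCast, this]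
      rw [pvAInner]
      have hguard : (0 : Int) < (n : Int) := by exact_mod_cast hpos
      rw [dif_pos hguard, hband]
      have hbl : PySem.Int.bitLength ((2 ^ pvLowPos n : Nat) : Int) = pvLowPos n + 1 :=
        pvBitLength_pow _
      rw [hbl]
      have hsub : (n : Int) - ((2 ^ pvLowPos n : Nat) : Int) = ((n - 2 ^ pvLowPos n : Nat) : Int) := by
        omega
      have hshift : ((((pvLowPos n + 1 : Nat) : Int) - 1) * E).toNat = pvLowPos n * E.toNat := by
        have : (((pvLowPos n + 1 : Nat) : Int) - 1) = ((pvLowPos n : Nat) : Int) := by push_cast; ring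
        rw [this, ← Int.toNat_natCast (pvLowPos n) ]
        rw [Int.toNat_natCast]
        rw [show ((pvLowPos n : Nat) : Int) * E = ((pvLowPos n : Nat) : Int) * (E.toNat : Int) by
              congr 1; omega]
        rw [← Int.natCast_mul, Int.toNat_natCast]
      rw [hshift]
      have hrcast : r = ((r.toNat : Nat) : Int) := by omega
      have hbor : PySem.Int.bor (a : Int) (r <<< (pvLowPos n * E.toNat)) =
          ((a ||| r.toNat <<< (pvLowPos n * E.toNat) : Nat) : Int) := by
        rw [hrcast, ← Int.natCast_shiftLeft, PySem.Int.bor_natCast]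
        simp only [Int.toNat_natCast]
      rw [hsub, hbor, ih (n - 2 ^ pvLowPos n) (by
            have : 0 < 2 ^ pvLowPos n := by positivity
            omega) _]
      congr 1
      rw [Nat.lor_assoc]
      congr 1
      rw [pvG_remove_low r.toNat E.toNat n hpos 0]
      simp

-- ===== testBit characterisations =====

theorem pvTb_or_foldl {α : Type} (l : List α) (f : α → Nat) (a : Nat) (j : Nat) :
    ((l.foldl (fun acc x => acc ||| f x) a).testBit j)
      = (a.testBit j || l.any (fun x => (f x).testBit j)) := by
  induction l generalizing a with
  | nil => simp
  | cons x l ih =>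
      simp only [List.foldl_cons, List.any_cons, ih, Nat.testBit_or]
      rw [Bool.or_assoc]

theorem pvTb_if_foldl {α : Type} (l : List α) (c : α → Bool) (f : α → Nat) (a : Nat) (j : Nat) :
    ((l.foldl (fun acc x => if c x then acc ||| f x else acc) a).testBit j)
      = (a.testBit j || l.any (fun x => c x && (f x).testBit j)) := by
  induction l generalizing a with
  | nil => simp
  | cons x l ih =>
      simp only [List.foldl_cons, List.any_cons, ih]
      cases hc : c x
      · simp
      · simp [Nat.testBit_or, Bool.or_assoc]

-- testBit characterisation of pvG
theorem pvTbG (r E n i j : Nat) :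
    (pvG r E n i).testBit j = true ↔
      ∃ k, n.testBit k = true ∧ (r <<< ((i + k) * E)).testBit j = true := by
  induction n using Nat.strong_induction_on generalizing i with
  | _ n ih =>
    rcases Nat.eq_zero_or_pos n with h0 | hpos
    · subst h0
      simp [pvG_zero]
    · rcases Nat.even_or_odd n with he | ho
      · obtain ⟨m, hm⟩ := he
        have hm2 : n = 2 * m := by omega
        subst hm2
        have hmpos : 0 < m := by omega
        rw [pvG_two_mul, ih m (by omega) (i + 1)]
        constructor
        · rintro ⟨k, hk1, hk2⟩
          refine ⟨k + 1, ?_, ?_⟩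
          · have : (2 * m).testBit (k + 1) = m.testBit k := by
              have : 2 * m / 2 = m := by omega
              rw [Nat.testBit_succ, this]
            rw [this]; exact hk1
          · have : i + (k + 1) = i + 1 + k := by omega
            rw [this]; exact hk2
        · rintro ⟨k, hk1, hk2⟩
          cases k with
          | zero =>
              have : (2 * m).testBit 0 = false := by
                simp [Nat.testBit_zero]
              rw [this] at hk1; exact absurd hk1 (by simp)
          | succ k =>
              refine ⟨k, ?_, ?_⟩
              · have : (2 * m).testBit (k + 1) = m.testBit k := by
                  have : 2 * m / 2 = m := by omega
                  rw [Nat.testBit_succ, this]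
                rw [← this]; exact hk1
              · have : i + 1 + k = i + (k + 1) := by omega
                rw [this]; exact hk2
      · have h1 : n % 2 = 1 := Nat.odd_iff.mp ho
        rw [pvG_odd r E n i h1]
        rw [show ((r <<< (i * E) ||| pvG r E (n / 2) (i + 1)).testBit j)
              = ((r <<< (i * E)).testBit j || (pvG r E (n / 2) (i + 1)).testBit j) from
            Nat.testBit_or _ _ _]
        rw [Bool.or_eq_true]
        have hhalf : n / 2 < n := by omega
        rw [ih (n / 2) hhalf (i + 1)]
        constructor
        · rintro (hl | ⟨k, hk1, hk2⟩)
          · refine ⟨0, ?_, ?_⟩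
            · simp [Nat.testBit_zero, h1]
            · simpa using hl
          · refine ⟨k + 1, ?_, ?_⟩
            · rw [Nat.testBit_succ]; exact hk1
            · have : i + (k + 1) = i + 1 + k := by omega
              rw [this]; exact hk2
        · rintro ⟨k, hk1, hk2⟩
          cases k with
          | zero => left; simpa using hk2
          | succ k =>
              right
              refine ⟨k, ?_, ?_⟩
              · rw [← Nat.testBit_succ]; exact hk1
              · have : i + 1 + k = i + (k + 1) := by omega
                rw [this]; exact hk2

-- a set bit of a pattern lies below W when every pattern's bitLength is ≤ W
theorem pvTestBit_lt (s k bl : Nat) (hbl : s < 2 ^ bl) (h : s.testBit k = true) : k < bl := by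
  by_contra hk
  have : 2 ^ k ≤ s := Nat.ge_two_pow_of_testBit h
  have : 2 ^ bl ≤ 2 ^ k := Nat.pow_le_pow_right (by omega) (by omega)
  omega

-- width fold bounds
theorem pvWidth_fold_ge (l : List Int) (w : Int) :
    w ≤ l.foldl (fun w p => max w ((PySem.Int.bitLength p : Int))) w := by
  induction l generalizing w with
  | nil => simp
  | cons p l ih =>
      simp only [List.foldl_cons]
      exact le_trans (le_max_left _ _) (ih _)

theorem pvWidth_fold_mem (l : List Int) (w : Int) (p : Int) (hp : p ∈ l) :
    ((PySem.Int.bitLength p : Nat) : Int) ≤ l.foldl (fun w p => max w ((PySem.Int.bitLength p : Int))) w := by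
  induction l generalizing w with
  | nil => simp at hp
  | cons q l ih =>
      simp only [List.foldl_cons]
      rcases List.mem_cons.mp hp with h | h
      · subst h
        exact le_trans (le_max_right _ _) (pvWidth_fold_ge l _)
      · exact ih _ h

-- the common Nat-level identity: pattern-major OR of pvG = index-major OR of blocks
theorem pvMain (Aall Et W : Nat) (ns : List Nat)
    (Hb : ∀ s ∈ ns, ∀ k, s.testBit k = true → k < W) :
    ns.foldl (fun a s => a ||| pvG (Aall ^^^ s) Et s 0) 0
      = (List.range W).foldl
          (fun res k =>
            res ||| (ns.foldl (fun b s => if s.testBit k then b ||| (Aall ^^^ s) else b) 0) <<< (k * Et))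
          0 := by
  apply Nat.eq_of_testBit_eq
  intro j
  rw [pvTb_or_foldl, pvTb_or_foldl]
  simp only [Nat.zero_testBit, Bool.false_or]
  rw [Bool.eq_iff_iff]
  simp only [List.any_eq_true, List.mem_range, Nat.testBit_shiftLeft]
  constructor
  · rintro ⟨s, hs, hbit⟩
    rw [pvTbG] at hbit
    obtain ⟨k, hk1, hk2⟩ := hbit
    simp only [Nat.zero_add] at hk2
    rw [Nat.testBit_shiftLeft, Bool.and_eq_true, decide_eq_true_iff] at hk2
    refine ⟨k, Hb s hs k hk1, ?_⟩
    rw [Bool.and_eq_true, decide_eq_true_iff]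
    refine ⟨hk2.1, ?_⟩
    rw [pvTb_if_foldl]
    simp only [Nat.zero_testBit, Bool.false_or, List.any_eq_true]
    exact ⟨s, hs, by rw [Bool.and_eq_true]; exact ⟨hk1, hk2.2⟩⟩
  · rintro ⟨k, hkW, hk⟩
    rw [Bool.and_eq_true, decide_eq_true_iff] at hk
    obtain ⟨hge, hblk⟩ := hk
    rw [pvTb_if_foldl] at hblk
    simp only [Nat.zero_testBit, Bool.false_or, List.any_eq_true] at hblk
    obtain ⟨s, hs, hsb⟩ := hblk
    rw [Bool.and_eq_true] at hsb
    refine ⟨s, hs, ?_⟩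
    rw [pvTbG]
    refine ⟨k, hsb.1, ?_⟩
    simp only [Nat.zero_add]
    rw [Nat.testBit_shiftLeft, Bool.and_eq_true, decide_eq_true_iff]
    exact ⟨hge, hsb.2⟩

-- A's outer fold, cast to Nat
theorem pvAFold_nat (E allv : Int) (hE : 0 ≤ E) (hall : 0 ≤ allv)
    (ps : List Int) (hps : ∀ p ∈ ps, 0 ≤ p) (a : Nat) :
    ps.foldl (fun anti s => pvAInner E (PySem.Int.bxor allv s) s anti) ((a : Nat) : Int)
      = (((ps.map Int.toNat).foldl
            (fun acc sn => acc ||| pvG (allv.toNat ^^^ sn) E.toNat sn 0) a : Nat) : Int) := by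
  induction ps generalizing a with
  | nil => simp
  | cons s ps ih =>
      have hs : 0 ≤ s := hps s (by simp)
      have hx : PySem.Int.bxor allv s = ((allv.toNat ^^^ s.toNat : Nat) : Int) := by
        conv_lhs => rw [show allv = ((allv.toNat : Nat) : Int) by omega,
            show s = ((s.toNat : Nat) : Int) by omega]
        rw [PySem.Int.bxor_natCast]
      simp only [List.foldl_cons, List.map_cons]
      have h1 : pvAInner E (PySem.Int.bxor allv s) s ((a : Nat) : Int)
          = ((a ||| pvG (allv.toNat ^^^ s.toNat) E.toNat s.toNat 0 : Nat) : Int) := by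
        have hr : 0 ≤ PySem.Int.bxor allv s := by rw [hx]; positivity
        have := pvAInner_eq E (PySem.Int.bxor allv s) hE hr s.toNat a
        rw [show ((s.toNat : Nat) : Int) = s by omega] at this
        rw [this, hx]
        simp
      rw [h1, ih (fun p hp => hps p (by simp [hp]))]

-- B's block, cast to Nat
theorem pvBBlock_nat (allv : Int) (hall : 0 ≤ allv) (k : Nat)
    (ps : List Int) (hps : ∀ p ∈ ps, 0 ≤ p) (a : Nat) :
    ps.foldl (fun block p =>
        if PySem.Int.band p ((1 : Int) <<< (k : Int)) ≠ 0 then PySem.Int.bor block (PySem.Int.bxor allv p) else block)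
      ((a : Nat) : Int)
      = (((ps.map Int.toNat).foldl
            (fun b s => if s.testBit k then b ||| (allv.toNat ^^^ s) else b) a : Nat) : Int) := by
  induction ps generalizing a with
  | nil => simp
  | cons p ps ih =>
      have hp : 0 ≤ p := hps p (by simp)
      have hmask : ((1 : Int) <<< (k : Int)) = ((2 ^ k : Nat) : Int) := by
        simp [Int.one_shiftLeft]
      have hband : PySem.Int.band p ((1 : Int) <<< (k : Int))
          = (((p.toNat.testBit k).toNat * 2 ^ k : Nat) : Int) := by
        conv_lhs => rw [hmask, show p = ((p.toNat : Nat) : Int) by omega]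
        rw [PySem.Int.band_natCast, Nat.and_two_pow]
      simp only [List.foldl_cons, List.map_cons]
      have hcond : (PySem.Int.band p ((1 : Int) <<< (k : Int)) ≠ 0) ↔ p.toNat.testBit k = true := by
        rw [hband]
        cases htb : p.toNat.testBit k
        · simp
        · simp
      by_cases hc : p.toNat.testBit k = true
      · rw [if_pos (hcond.mpr hc), if_pos hc]
        have hx : PySem.Int.bor ((a : Nat) : Int) (PySem.Int.bxor allv p)
            = ((a ||| (allv.toNat ^^^ p.toNat) : Nat) : Int) := by
          conv_lhs => rw [show allv = ((allv.toNat : Nat) : Int) by omega,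
              show p = ((p.toNat : Nat) : Int) by omega]
          rw [PySem.Int.bxor_natCast, PySem.Int.bor_natCast]
        rw [hx, ih (fun q hq => hps q (by simp [hq]))]
      · rw [if_neg (fun h => hc (hcond.mp h)), if_neg hc, ih (fun q hq => hps q (by simp [hq]))]

-- B's outer fold, cast to Nat
theorem pvBFold_nat (E : Int) (hE : 0 ≤ E) (g : Nat → Nat) (l : List Nat) (a : Nat) :
    l.foldl (fun result (k : Nat) =>
        PySem.Int.bor result ((((g k : Nat) : Int)) <<< ((((k : Nat) : Int) * E).toNat)))
      ((a : Nat) : Int)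
      = ((l.foldl (fun res k => res ||| (g k) <<< (k * E.toNat)) a : Nat) : Int) := by
  induction l generalizing a with
  | nil => simp
  | cons k l ih =>
      simp only [List.foldl_cons]
      have hsh : ((((k : Nat) : Int)) * E).toNat = k * E.toNat := by
        conv_lhs => rw [show E = ((E.toNat : Nat) : Int) by omega]
        rw [← Int.natCast_mul, Int.toNat_natCast]
      have hstep : PySem.Int.bor ((a : Nat) : Int) ((((g k : Nat) : Int)) <<< ((((k : Nat) : Int) * E).toNat))
          = ((a ||| (g k) <<< (k * E.toNat) : Nat) : Int) := by
        rw [hsh, ← Int.natCast_shiftLeft, PySem.Int.bor_natCast]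
      rw [hstep, ih]

-- ===== VERDICT =====
theorem anti_implications_from_patterns_spec : Claim_equal_anti_implications_from_patterns := by
  unfold Claim_equal_anti_implications_from_patterns
  intro patterns equation_count _hdom hpre
  obtain ⟨hE, hps⟩ := hpre
  unfold Spec_anti_implications_from_patterns
  have hall : (0 : Int) ≤ ((1 <<< equation_count.toNat : Nat) : Int) - 1 := by
    have h1 : (1 : Nat) ≤ 1 <<< equation_count.toNat := by
      rw [Nat.shiftLeft_eq, one_mul]
      exact Nat.one_le_two_pow
    omega
  set allv : Int := ((1 <<< equation_count.toNat : Nat) : Int) - 1 with hallv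
  set W : Nat := (pvBWidth patterns).toNat with hW
  have hWnn : 0 ≤ pvBWidth patterns := pvWidth_fold_ge patterns 0
  have hA : anti_implications_from_patterns patterns equation_count
      = (((patterns.map Int.toNat).foldl
            (fun acc sn => acc ||| pvG (allv.toNat ^^^ sn) equation_count.toNat sn 0) 0 : Nat) : Int) := by
    show patterns.foldl
        (fun anti s => pvAInner equation_count (PySem.Int.bxor allv s) s anti) (((0 : Nat)) : Int) = _
    exact pvAFold_nat equation_count allv hE hall patterns hps 0
  have hB : anti_implications_from_patterns_alt patterns equation_count
      = (((List.range W).foldl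
            (fun res k =>
              res ||| ((patterns.map Int.toNat).foldl
                  (fun b s => if s.testBit k then b ||| (allv.toNat ^^^ s) else b) 0)
                <<< (k * equation_count.toNat)) 0 : Nat) : Int) := by
    show (PySem.List.pyRange 0 (pvBWidth patterns) 1).foldl
        (fun result index =>
          PySem.Int.bor result
            ((pvBBlock allv ((1 : Int) <<< index.toNat) patterns) <<< ((index * equation_count).toNat)))
        (((0 : Nat)) : Int) = _
    rw [show pvBWidth patterns = ((W : Nat) : Int) by omega, PySem.List.pyRange_zero_nat,
        List.foldl_map]
    have hblk : ∀ k : Nat,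
        pvBBlock allv ((1 : Int) <<< ((((k : Nat) : Int)).toNat : Int)) patterns
          = (((patterns.map Int.toNat).foldl
                (fun b s => if s.testBit k then b ||| (allv.toNat ^^^ s) else b) 0 : Nat) : Int) := by
      intro k
      unfold pvBBlock
      rw [show (((((k : Nat) : Int)).toNat : Nat) : Int) = ((k : Nat) : Int) by omega]
      rw [show (0 : Int) = (((0 : Nat)) : Int) from rfl]
      exact pvBBlock_nat allv hall k patterns hps 0
    have := pvBFold_nat equation_count hE
        (fun k => (patterns.map Int.toNat).foldl
            (fun b s => if s.testBit k then b ||| (allv.toNat ^^^ s) else b) 0)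
        (List.range W) 0
    rw [← this]
    apply PySem.List.foldl_congr_mem
    intro acc k _
    rw [hblk k]
  rw [hA, hB]
  congr 1
  apply pvMain
  intro s hs k htb
  obtain ⟨p, hpmem, hpeq⟩ := List.mem_map.mp hs
  have hp : 0 ≤ p := hps p hpmem
  have hlt : s < 2 ^ PySem.Int.bitLength p := by
    have h1 := PySem.Int.lt_two_pow_bitLength p
    have h2 : p.natAbs = s := by omega
    omega
  have hkbl : k < PySem.Int.bitLength p := pvTestBit_lt s k _ hlt htb
  have hble : ((PySem.Int.bitLength p : Nat) : Int) ≤ pvBWidth patterns :=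
    pvWidth_fold_mem patterns 0 p hpmem
  omega
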